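-- pv_equiv track=rewrite | github.com/tipdaddy78/advent_of_code | 2019/day4.py | valid_pass2
-- ===== SOURCE A (Python) =====
-- def valid_pass2(pwd):
--     has_double = False
--     always_inc = True
--     i = 0
--     while i < len(pwd) - 1:
--         p = int(pwd[i])
--         p1 = int(pwd[i+1])
--         if p == p1:
--             j = i + 2
--             while j < len(pwd):
--                 if int(pwd[j]) == p:
--                     j += 1
--                 else:
--                     break
--             if j == (i + 2):
--                 has_double = True
--             i = j - 1
--         else:
--             if p > p1:
--                 always_inc = False
--                 break
--             i += 1
--     if has_double and always_inc:
--         return True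
--     return False
-- ===== SOURCE B (Python) =====
-- from itertools import groupby
--
-- def valid_pass2(pwd):
--     for i in range(len(pwd) - 1):
--         if int(pwd[i]) > int(pwd[i + 1]):
--             return False
--     return any(len(list(g)) == 2 for _, g in groupby(pwd))
-- ===== Notes on version B (the rewrite author's own statement) =====
-- stated objective: idiomatic
-- what changed: A's single index-jumping while loop that skips over equal runs with a nested inner scan is replaced by a plain pairwise non-decreasing forward scan followed by a separate groupby-style run-length pass checking for a run of exactly two.
import Mathlib
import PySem

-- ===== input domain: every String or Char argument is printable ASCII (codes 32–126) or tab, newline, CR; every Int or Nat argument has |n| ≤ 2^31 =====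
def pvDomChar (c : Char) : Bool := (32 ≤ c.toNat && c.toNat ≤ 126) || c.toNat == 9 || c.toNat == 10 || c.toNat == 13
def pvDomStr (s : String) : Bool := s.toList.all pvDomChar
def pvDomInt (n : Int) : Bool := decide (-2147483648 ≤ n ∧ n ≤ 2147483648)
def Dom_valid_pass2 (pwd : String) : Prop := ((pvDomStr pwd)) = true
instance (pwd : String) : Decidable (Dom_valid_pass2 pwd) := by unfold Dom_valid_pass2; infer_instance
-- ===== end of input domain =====

-- B replaces A's index-jumping run-skip while loop by a plain pairwise non-decreasing scan followed
-- by a groupby-style run-length pass (more idiomatic; same cost).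

-- int(pwd[i]) on the one-character string pwd[i]; Pre_ guarantees the character is a digit, so no ValueError
def pvIntOf (c : Char) : Int := (PySem.Int.ofChars? [c]).getD 0

-- ===== PORT A =====
-- inner while loop: j advances while int(pwd[j]) == p
def pvAInner (l : List Char) (p : Int) (j : Nat) : Nat :=
  if _h : j < l.length then
    if pvIntOf (l.getD j ' ') = p then pvAInner l p (j + 1) else j
  else j
termination_by l.length - j

-- the outer loop's termination needs this (cited in decreasing_by)
theorem pvAInner_ge (l : List Char) (p : Int) (j : Nat) : j ≤ pvAInner l p j := by
  fun_induction pvAInner l p j with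
  | case1 => omega
  | case2 => omega
  | case3 => omega

-- outer while loop; returns (has_double, always_inc); p = int(pwd[i]), p1 = int(pwd[i+1]) inlined
def pvALoop (l : List Char) (i : Nat) (hasDouble : Bool) : Bool × Bool :=
  if _h : i + 1 < l.length then
    if pvIntOf (l.getD i ' ') = pvIntOf (l.getD (i + 1) ' ') then
      pvALoop l (pvAInner l (pvIntOf (l.getD i ' ')) (i + 2) - 1)
        (if pvAInner l (pvIntOf (l.getD i ' ')) (i + 2) = i + 2 then true else hasDouble)
    else if pvIntOf (l.getD i ' ') > pvIntOf (l.getD (i + 1) ' ') then (hasDouble, false)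
    else pvALoop l (i + 1) hasDouble
  else (hasDouble, true)
termination_by l.length - i
decreasing_by
  · have := pvAInner_ge l (pvIntOf (l.getD i ' ')) (i + 2); omega
  · omega

def valid_pass2 (pwd : String) : Bool :=
  (pvALoop pwd.toList 0 false).1 && (pvALoop pwd.toList 0 false).2

-- ===== PORT B =====
-- for i in range(len(pwd)-1): if int(pwd[i]) > int(pwd[i+1]): return False
def pvBNonDec (l : List Char) (i : Nat) : Bool :=
  if _h : i + 1 < l.length then
    if pvIntOf (l.getD i ' ') > pvIntOf (l.getD (i + 1) ' ') then false
    else pvBNonDec l (i + 1)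
  else true
termination_by l.length - i

-- groupby step: (length of the leading run of c in ds, rest of ds)
def pvBTake (c : Char) : List Char → Nat × List Char
  | [] => (0, [])
  | d :: ds => if d = c then ((pvBTake c ds).1 + 1, (pvBTake c ds).2) else (0, d :: ds)

-- pvBHasDouble's termination needs this (cited in decreasing_by)
theorem pvBTake_snd_le (c : Char) (ds : List Char) : (pvBTake c ds).2.length ≤ ds.length := by
  induction ds with
  | nil => simp [pvBTake]
  | cons d ds ih => by_cases h : d = c <;> simp [pvBTake, h]; omega

-- any(len(list(g)) == 2 for _, g in groupby(pwd))
def pvBHasDouble : List Char → Bool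
  | [] => false
  | c :: ds => ((pvBTake c ds).1 + 1 == 2) || pvBHasDouble (pvBTake c ds).2
termination_by l => l.length
decreasing_by have := pvBTake_snd_le c ds; simp; omega

def valid_pass2_alt (pwd : String) : Bool :=
  if pvBNonDec pwd.toList 0 then pvBHasDouble pwd.toList else false

-- ===== PRECONDITION & SPEC =====
-- Pre_ holds exactly where A returns a value: short input, all digits, or a strict decrease inside
-- the leading digit prefix (then A returns False before converting the first non-digit); on every
-- other input A raises ValueError at the first non-digit it converts (and B raises there too).
def Pre_valid_pass2 (pwd : String) : Prop :=
  pwd.toList.length ≤ 1 ∨ pwd.toList.all Char.isDigit = true ∨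
    ¬ List.IsChain (· ≤ ·) (pwd.toList.takeWhile Char.isDigit)
instance (pwd : String) : Decidable (Pre_valid_pass2 pwd) := by unfold Pre_valid_pass2; infer_instance

def pvWitness_valid_pass2 : String := "11234"

def Spec_valid_pass2 (pwd : String) (out : Bool) : Prop := out = valid_pass2_alt pwd
instance (pwd : String) (out : Bool) : Decidable (Spec_valid_pass2 pwd out) := by unfold Spec_valid_pass2; infer_instance

-- ===== CLAIM (what is proved, stated in full; the proofs are below) =====
def Claim_equal_valid_pass2 : Prop := ∀ (pwd : String), Dom_valid_pass2 pwd → Pre_valid_pass2 pwd → Spec_valid_pass2 pwd (valid_pass2 pwd)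

-- ===== LEMMAS AND PROOFS =====

def pvDigits : List Char := ['0', '1', '2', '3', '4', '5', '6', '7', '8', '9']

set_option maxRecDepth 100000 in
theorem pvIntOf_0 : pvIntOf '0' = 0 := by decide
set_option maxRecDepth 100000 in
theorem pvIntOf_1 : pvIntOf '1' = 1 := by decide
set_option maxRecDepth 100000 in
theorem pvIntOf_2 : pvIntOf '2' = 2 := by decide
set_option maxRecDepth 100000 in
theorem pvIntOf_3 : pvIntOf '3' = 3 := by decide
set_option maxRecDepth 100000 in
theorem pvIntOf_4 : pvIntOf '4' = 4 := by decide
set_option maxRecDepth 100000 in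
theorem pvIntOf_5 : pvIntOf '5' = 5 := by decide
set_option maxRecDepth 100000 in
theorem pvIntOf_6 : pvIntOf '6' = 6 := by decide
set_option maxRecDepth 100000 in
theorem pvIntOf_7 : pvIntOf '7' = 7 := by decide
set_option maxRecDepth 100000 in
theorem pvIntOf_8 : pvIntOf '8' = 8 := by decide
set_option maxRecDepth 100000 in
theorem pvIntOf_9 : pvIntOf '9' = 9 := by decide

-- on digit characters, int() is injective
theorem pv_inj : ∀ c ∈ pvDigits, ∀ d ∈ pvDigits, pvIntOf c = pvIntOf d → c = d := by
  intro c hc d hd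
  fin_cases hc <;> fin_cases hd <;>
    simp [pvIntOf_0, pvIntOf_1, pvIntOf_2, pvIntOf_3, pvIntOf_4, pvIntOf_5, pvIntOf_6, pvIntOf_7,
      pvIntOf_8, pvIntOf_9]

theorem pv_isDigit_mem (c : Char) (h : c.isDigit = true) : c ∈ pvDigits := by
  have h' : 48 ≤ c.toNat ∧ c.toNat ≤ 57 := by
    simp [Char.isDigit] at h
    exact ⟨h.1, h.2⟩
  have hofn : Char.ofNat c.toNat = c := Char.ofNat_toNat c
  obtain ⟨h1, h2⟩ := h'
  set n := c.toNat with hn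
  interval_cases n <;> rw [← hofn] <;> decide

-- on digit characters, the character order agrees with the order of the int() values
theorem pv_lt_val : ∀ c ∈ pvDigits, ∀ d ∈ pvDigits, ¬ c ≤ d → pvIntOf d < pvIntOf c := by
  intro c hc d hd
  fin_cases hc <;> fin_cases hd <;>
    simp only [pvIntOf_0, pvIntOf_1, pvIntOf_2, pvIntOf_3, pvIntOf_4, pvIntOf_5, pvIntOf_6,
      pvIntOf_7, pvIntOf_8, pvIntOf_9] <;> decide

theorem pv_getD_mem (l : List Char) (i : Nat) (h : i < l.length) : l.getD i ' ' ∈ l := by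
  rw [List.getD_eq_getElem _ _ h]; exact List.getElem_mem h

theorem pv_inj' (l : List Char) (H : ∀ c ∈ l, c ∈ pvDigits) {a b : Nat}
    (ha : a < l.length) (hb : b < l.length)
    (h : pvIntOf (l.getD a ' ') = pvIntOf (l.getD b ' ')) : l.getD a ' ' = l.getD b ' ' :=
  pv_inj _ (H _ (pv_getD_mem l a ha)) _ (H _ (pv_getD_mem l b hb)) h

theorem pv_drop_getD (l : List Char) (i k : Nat) : (l.drop i).getD k ' ' = l.getD (i + k) ' ' := by
  simp [List.getD_eq_getElem?_getD, List.getElem?_drop]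

theorem pv_drop_cons (l : List Char) (i : Nat) (h : i < l.length) :
    l.drop i = l.getD i ' ' :: l.drop (i + 1) := by
  rw [List.getD_eq_getElem _ _ h]; exact List.drop_eq_getElem_cons h

-- characterization of the inner while loop: it stops at the first index whose digit differs from p
theorem pvAInner_spec (l : List Char) (p : Int) (j0 : Nat) (hj : j0 ≤ l.length) :
    j0 ≤ pvAInner l p j0 ∧ pvAInner l p j0 ≤ l.length ∧
    (∀ k, j0 ≤ k → k < pvAInner l p j0 → pvIntOf (l.getD k ' ') = p) ∧
    (pvAInner l p j0 < l.length → pvIntOf (l.getD (pvAInner l p j0) ' ') ≠ p) := by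
  fun_induction pvAInner l p j0 with
  | case1 j _h heq ih =>
    obtain ⟨ih1, ih2, ih3, ih4⟩ := ih (by omega)
    refine ⟨by omega, ih2, ?_, ih4⟩
    intro k hk1 hk2
    rcases Nat.eq_or_lt_of_le hk1 with rfl | h'
    · exact heq
    · exact ih3 k h' hk2
  | case2 j _h hne =>
    exact ⟨le_refl _, by omega, by omega, fun _ => hne⟩
  | case3 j _h =>
    exact ⟨le_refl _, by omega, by omega, by omega⟩

-- pvBTake computes (m, drop m) when the first m elements are c and the next one (if any) is not
theorem pvBTake_spec (c : Char) (ds : List Char) (m : Nat) (hm : m ≤ ds.length)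
    (hall : ∀ k, k < m → ds.getD k ' ' = c)
    (hstop : m = ds.length ∨ ds.getD m ' ' ≠ c) :
    pvBTake c ds = (m, ds.drop m) := by
  induction ds generalizing m with
  | nil => simp at hm; subst hm; simp [pvBTake]
  | cons d ds ih =>
    cases m with
    | zero =>
      rcases hstop with h | h
      · simp at h
      · simp [List.getD] at h
        simp [pvBTake, h]
    | succ m' =>
      have hd : d = c := hall 0 (by omega)
      have := ih m' (by simpa using hm)
        (fun k hk => by simpa using hall (k + 1) (by omega))
        (by rcases hstop with h | h
            · left; simpa using h
            · right; simpa using h)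
      simp [pvBTake, hd, this]

-- one non-decreasing step can be peeled from the pairwise scan
theorem pvBNonDec_step (l : List Char) (i : Nat)
    (h : ¬ pvIntOf (l.getD i ' ') > pvIntOf (l.getD (i + 1) ' ')) :
    pvBNonDec l i = pvBNonDec l (i + 1) := by
  by_cases h1 : i + 1 < l.length
  · rw [pvBNonDec]
    simp only [dif_pos h1, if_neg h]
  · rw [pvBNonDec, pvBNonDec]
    rw [dif_neg h1, dif_neg (by omega)]

-- within a run of constant int() value the pairwise scan's verdict does not change
theorem pv_run_nonDec (l : List Char) (v : Int) :
    ∀ d a, (∀ k, a ≤ k → k ≤ a + d → pvIntOf (l.getD k ' ') = v) →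
      pvBNonDec l a = pvBNonDec l (a + d) := by
  intro d
  induction d with
  | zero => intro a _; rfl
  | succ d ih =>
    intro a hall
    have h1 : pvIntOf (l.getD a ' ') = v := hall a (le_refl _) (by omega)
    have h2 : pvIntOf (l.getD (a + 1) ' ') = v := hall (a + 1) (by omega) (by omega)
    have : pvBNonDec l a = pvBNonDec l (a + 1) := by
      apply pvBNonDec_step
      rw [h1, h2]; omega
    rw [this, show a + (d + 1) = (a + 1) + d by omega]
    exact ih (a + 1) (fun k hk1 hk2 => hall k (by omega) (by omega))

theorem pvBHasDouble_short (l : List Char) (h : l.length ≤ 1) : pvBHasDouble l = false := by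
  match l, h with
  | [], _ => simp [pvBHasDouble]
  | [c], _ => simp [pvBHasDouble, pvBTake]

-- MAIN INVARIANT: on all-digit lists, the always_inc flag equals B's pairwise scan from i, and when
-- that scan succeeds the has_double flag accumulates B's groupby test on the suffix from i
theorem pv_main (l : List Char) (H : ∀ c ∈ l, c ∈ pvDigits) :
    ∀ n i hd, l.length - i ≤ n →
      (pvALoop l i hd).2 = pvBNonDec l i ∧
      (pvBNonDec l i = true → (pvALoop l i hd).1 = (hd || pvBHasDouble (l.drop i))) := by
  intro n
  induction n with
  | zero =>
    intro i hd hn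
    have hlen : l.length ≤ i := by omega
    rw [pvALoop, pvBNonDec]
    have h1 : ¬ (i + 1 < l.length) := by omega
    simp only [dif_neg h1]
    refine ⟨by simp, fun _ => ?_⟩
    rw [List.drop_eq_nil_of_le hlen]
    simp [pvBHasDouble]
  | succ n ihn =>
    intro i hd hn
    by_cases h1 : i + 1 < l.length
    case neg =>
      rw [pvALoop, pvBNonDec]
      simp only [dif_neg h1]
      refine ⟨by simp, fun _ => ?_⟩
      rw [pvBHasDouble_short (l.drop i) (by simp; omega)]
      simp
    case pos =>
      have hi : i < l.length := by omega
      by_cases heq : pvIntOf (l.getD i ' ') = pvIntOf (l.getD (i + 1) ' ')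
      case pos =>
        -- run case
        set p := pvIntOf (l.getD i ' ') with hp
        set j := pvAInner l p (i + 2) with hj
        obtain ⟨hj1, hj2, hj3, hj4⟩ := pvAInner_spec l p (i + 2) (by omega)
        rw [← hj] at hj1 hj2 hj3 hj4
        have hci1 : l.getD (i + 1) ' ' = l.getD i ' ' := pv_inj' l H h1 hi heq.symm
        -- every position in [i, j) holds the character l.getD i ' '
        have hrun : ∀ k, i ≤ k → k < j → l.getD k ' ' = l.getD i ' ' := by
          intro k hk1 hk2
          rcases Nat.lt_or_ge k (i + 2) with h' | h'
          · have hk : k = i ∨ k = i + 1 := by omega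
            rcases hk with rfl | rfl
            · rfl
            · exact hci1
          · exact pv_inj' l H (by omega) hi (by rw [hj3 k h' hk2, hp])
        have hstopc : j < l.length → l.getD j ' ' ≠ l.getD i ' ' := by
          intro hjl hc
          exact hj4 hjl (by rw [hc, hp])
        -- unfold A one step
        rw [pvALoop]
        simp only [dif_pos h1, if_pos heq, ← hp, ← hj]
        -- IH at j - 1
        obtain ⟨ihA, ihB⟩ := ihn (j - 1) (if j = i + 2 then true else hd) (by omega)
        -- B's scan agrees between i and j - 1
        have hnd : pvBNonDec l i = pvBNonDec l (j - 1) := by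
          have := pv_run_nonDec l p (j - 1 - i) i
            (fun k hk1 hk2 => by rw [hrun k hk1 (by omega)]; try exact hp.symm)
          rw [this, show i + (j - 1 - i) = j - 1 by omega]
        constructor
        · rw [ihA, hnd]
        · intro hndt
          rw [ihB (by rw [← hnd]; exact hndt)]
          -- pvBTake of the run tail from j - 1 and from i
          have htk0 : pvBTake (l.getD i ' ') (l.drop j) = (0, l.drop j) := by
            have := pvBTake_spec (l.getD i ' ') (l.drop j) 0 (by omega) (by omega)
              (by rcases Nat.eq_or_lt_of_le hj2 with h' | h'
                  · left; simp [h']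
                  · right; rw [pv_drop_getD]; simpa using hstopc (by omega))
            simpa using this
          have hdj1 : l.drop (j - 1) = l.getD i ' ' :: l.drop j := by
            rw [pv_drop_cons l (j - 1) (by omega), hrun (j - 1) (by omega) (by omega),
              show j - 1 + 1 = j by omega]
          have hBj1 : pvBHasDouble (l.drop (j - 1)) = pvBHasDouble (l.drop j) := by
            rw [hdj1, pvBHasDouble, htk0]
            simp
          have htkm : pvBTake (l.getD i ' ') (l.drop (i + 1)) = (j - (i + 1), l.drop j) := by
            have := pvBTake_spec (l.getD i ' ') (l.drop (i + 1)) (j - (i + 1))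
              (by simp; omega)
              (by intro k hk; rw [pv_drop_getD]; exact hrun (i + 1 + k) (by omega) (by omega))
              (by rcases Nat.eq_or_lt_of_le hj2 with h' | h'
                  · left; simp; omega
                  · right; rw [pv_drop_getD, show i + 1 + (j - (i + 1)) = j by omega]
                    exact hstopc (by omega))
            rw [this, List.drop_drop, show i + 1 + (j - (i + 1)) = j by omega]
          have hdi : l.drop i = l.getD i ' ' :: l.drop (i + 1) := pv_drop_cons l i hi
          rw [hdi, pvBHasDouble, htkm]
          have : (j - (i + 1) + 1 == 2) = decide (j = i + 2) := by
            by_cases h' : j = i + 2 <;> simp [h'] <;> omega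
          rw [this, hBj1]
          by_cases hji2 : j = i + 2 <;> simp [hji2]
      case neg =>
        by_cases hgt : pvIntOf (l.getD i ' ') > pvIntOf (l.getD (i + 1) ' ')
        case pos =>
          rw [pvALoop, pvBNonDec]
          simp only [dif_pos h1, if_neg heq, if_pos hgt]
          exact ⟨by simp, by simp⟩
        case neg =>
          rw [pvALoop]
          simp only [dif_pos h1, if_neg heq, if_neg hgt]
          obtain ⟨ihA, ihB⟩ := ihn (i + 1) hd (by omega)
          have hstep : pvBNonDec l i = pvBNonDec l (i + 1) := pvBNonDec_step l i hgt
          constructor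
          · rw [ihA, hstep]
          · intro hndt
            rw [ihB (by rw [← hstep]; exact hndt)]
            have hcne : l.getD (i + 1) ' ' ≠ l.getD i ' ' := by
              intro hc; exact heq (by rw [hc])
            have htk0 : pvBTake (l.getD i ' ') (l.drop (i + 1)) = (0, l.drop (i + 1)) := by
              have := pvBTake_spec (l.getD i ' ') (l.drop (i + 1)) 0 (by omega) (by omega)
                (by right; rw [pv_drop_getD]; simpa using hcne)
              simpa using this
            rw [pv_drop_cons l i hi, pvBHasDouble, htk0]
            simp

-- a strict decrease within an all-digit region ahead makes both scans answer False
theorem pv_dec (l : List Char) :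
    ∀ n i hd, l.length - i ≤ n →
      (∃ k, i ≤ k ∧ k + 1 < l.length ∧ (∀ m, i ≤ m → m ≤ k + 1 → l.getD m ' ' ∈ pvDigits) ∧
        pvIntOf (l.getD (k + 1) ' ') < pvIntOf (l.getD k ' ')) →
      (pvALoop l i hd).2 = false ∧ pvBNonDec l i = false := by
  intro n
  induction n with
  | zero =>
    intro i hd hn hex
    obtain ⟨k, hik, hk1, _, _⟩ := hex
    omega
  | succ n ihn =>
    intro i hd hn hex
    obtain ⟨k, hik, hk1, hdig, hdec⟩ := hex
    have h1 : i + 1 < l.length := by omega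
    by_cases heq : pvIntOf (l.getD i ' ') = pvIntOf (l.getD (i + 1) ' ')
    case pos =>
      set p := pvIntOf (l.getD i ' ') with hp
      set j := pvAInner l p (i + 2) with hj
      obtain ⟨hj1, hj2, hj3, _⟩ := pvAInner_spec l p (i + 2) (by omega)
      rw [← hj] at hj1 hj2 hj3
      -- the decrease cannot sit at (i, i+1): those two values are equal
      have hki : i + 1 ≤ k := by
        rcases Nat.eq_or_lt_of_le hik with rfl | h'
        · rw [← hp, ← heq] at hdec; omega
        · omega
      -- the inner scan stops no later than k + 1
      have hjle : j ≤ k + 1 := by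
        by_contra h'
        have hfk : pvIntOf (l.getD k ' ') = p := by
          rcases Nat.eq_or_lt_of_le hki with h'' | h''
          · rw [← h'', ← heq, hp]
          · exact hj3 k (by omega) (by omega)
        have hfk1 : pvIntOf (l.getD (k + 1) ' ') = p := hj3 (k + 1) (by omega) (by omega)
        rw [hfk, hfk1] at hdec; omega
      rw [pvALoop]
      simp only [dif_pos h1, if_pos heq, ← hp, ← hj]
      obtain ⟨ih1, ih2⟩ := ihn (j - 1) (if j = i + 2 then true else hd) (by omega)
        ⟨k, by omega, hk1, fun m hm1 hm2 => hdig m (by omega) hm2, hdec⟩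
      have hstep : pvBNonDec l i = pvBNonDec l (j - 1) := by
        have := pv_run_nonDec l p (j - 1 - i) i
          (fun m hm1 hm2 => by
            rcases Nat.lt_or_ge m (i + 2) with h' | h'
            · have hm : m = i ∨ m = i + 1 := by omega
              rcases hm with rfl | rfl
              · exact hp.symm
              · exact heq.symm
            · exact hj3 m h' (by omega))
        rw [this, show i + (j - 1 - i) = j - 1 by omega]
      exact ⟨ih1, by rw [hstep]; exact ih2⟩
    case neg =>
      by_cases hgt : pvIntOf (l.getD i ' ') > pvIntOf (l.getD (i + 1) ' ')
      case pos =>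
        rw [pvALoop, pvBNonDec]
        simp only [dif_pos h1, if_neg heq, if_pos hgt]
        exact ⟨by simp, by simp⟩
      case neg =>
        have hki : i + 1 ≤ k := by
          rcases Nat.eq_or_lt_of_le hik with rfl | h'
          · omega
          · omega
        rw [pvALoop]
        simp only [dif_pos h1, if_neg heq, if_neg hgt]
        obtain ⟨ih1, ih2⟩ := ihn (i + 1) hd (by omega)
          ⟨k, hki, hk1, fun m hm1 hm2 => hdig m (by omega) hm2, hdec⟩
        have hstep := pvBNonDec_step l i hgt
        exact ⟨ih1, by rw [hstep]; exact ih2⟩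

-- ===== VERDICT (by name: the statement is the Claim_ definition above) =====
theorem valid_pass2_spec : Claim_equal_valid_pass2 := by
  intro pwd _hdom hpre
  unfold Spec_valid_pass2 valid_pass2 valid_pass2_alt
  rcases hpre with hshort | hdig | hdec
  · match h : pwd.toList, hshort with
    | [], _ => simp [pvALoop, pvBNonDec, pvBHasDouble]
    | [c], _ => simp [pvALoop, pvBNonDec, pvBHasDouble, pvBTake]
  · have hdig' : ∀ c ∈ pwd.toList, c ∈ pvDigits := fun c hc =>
      pv_isDigit_mem c (List.all_eq_true.mp hdig c hc)
    obtain ⟨hA, hB⟩ := pv_main pwd.toList hdig' pwd.toList.length 0 false (by omega)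
    rw [hA]
    by_cases hnd : pvBNonDec pwd.toList 0 = true
    · rw [hB hnd, hnd]
      simp
    · simp at hnd
      rw [hnd]
      simp
  · -- a strict decrease inside the leading digit prefix: both programs answer False
    have hex : ∃ k, ∃ _ : k + 1 < (pwd.toList.takeWhile Char.isDigit).length,
        ¬ (pwd.toList.takeWhile Char.isDigit)[k] ≤ (pwd.toList.takeWhile Char.isDigit)[k + 1] := by
      by_contra hall
      apply hdec
      rw [List.isChain_iff_getElem]
      intro m hm
      by_contra hni
      exact hall ⟨m, by omega, hni⟩
    obtain ⟨k, hk, hlt⟩ := hex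
    have hpref : pwd.toList.takeWhile Char.isDigit <+: pwd.toList := List.takeWhile_prefix _
    have hlen : (pwd.toList.takeWhile Char.isDigit).length ≤ pwd.toList.length :=
      hpref.length_le
    have hgd : ∀ m, (hm : m < (pwd.toList.takeWhile Char.isDigit).length) →
        pwd.toList.getD m ' ' = (pwd.toList.takeWhile Char.isDigit)[m] := by
      intro m hm
      rw [List.getD_eq_getElem _ _ (by omega)]
      exact (List.IsPrefix.getElem hpref hm).symm
    have hmem : ∀ m, (hm : m < (pwd.toList.takeWhile Char.isDigit).length) →
        (pwd.toList.takeWhile Char.isDigit)[m] ∈ pvDigits := by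
      intro m hm
      exact pv_isDigit_mem _ (List.mem_takeWhile_imp (List.getElem_mem hm))
    obtain ⟨hA2, hB⟩ := pv_dec pwd.toList pwd.toList.length 0 false (by omega)
      ⟨k, by omega, by omega,
        fun m _ hm2 => by rw [hgd m (by omega)]; exact hmem m (by omega),
        by rw [hgd k (by omega), hgd (k + 1) (by omega)]
           exact pv_lt_val _ (hmem k (by omega)) _ (hmem (k + 1) (by omega)) hlt⟩
    rw [hA2, hB]
    simp
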